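-- pv_equiv track=rewrite | github.com/tuhuuxxx/Learning-Python | Ki Ba Lan Class.py | convert_unary_to_binary_op
-- ===== SOURCE A (Python) =====
-- def is_operator(ch):
--     return ch in ['^', '*', '/', '+', '-']
--
-- def check_incre_decre_op(s):
--     result = []
--     for i in range(len(s)):
--         if (i==0 and (s[i]=='+' or s[i]=='-')) or (is_operator(s[i-1]) and (s[i]=='+' or s[i]=='-')) or (s[i-1]=='(' and (s[i]=='+' or s[i]=='-')):
--             result.append('true')
--         else:
--             result.append('false')
--     return result
--
-- def convert_unary_to_binary_op(s):
--     result = check_incre_decre_op(s)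
--     new_str = ''
--
--     for i in range(len(s)):
--         if result[i] == 'true':
--             if s[i] == '-':
--                 new_str = new_str + '(0-1)*'
--             else:    # s[i] == '-'
--                 pass
--         else:
--             new_str = new_str + s[i]
--     return new_str
-- ===== SOURCE B (Python) =====
-- def convert_unary_to_binary_op(s):
--     out = []
--     prev = None
--     for ch in s:
--         if ch in '+-' and (prev is None or prev in '^*/+-('):
--             if ch == '-':
--                 out.append('(0-1)*')
--         else:
--             out.append(ch)
--         prev = ch
--     return ''.join(out)
-- ===== Notes on version B (the rewrite author's own statement) =====
-- stated objective: simpler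
-- what changed: Replaces the two-pass design (precompute a 'true'/'false' flag list via index arithmetic with an s[-1] wrap access, then reconsume it by index) with a single streaming pass that keeps only the previous character.
import Mathlib
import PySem

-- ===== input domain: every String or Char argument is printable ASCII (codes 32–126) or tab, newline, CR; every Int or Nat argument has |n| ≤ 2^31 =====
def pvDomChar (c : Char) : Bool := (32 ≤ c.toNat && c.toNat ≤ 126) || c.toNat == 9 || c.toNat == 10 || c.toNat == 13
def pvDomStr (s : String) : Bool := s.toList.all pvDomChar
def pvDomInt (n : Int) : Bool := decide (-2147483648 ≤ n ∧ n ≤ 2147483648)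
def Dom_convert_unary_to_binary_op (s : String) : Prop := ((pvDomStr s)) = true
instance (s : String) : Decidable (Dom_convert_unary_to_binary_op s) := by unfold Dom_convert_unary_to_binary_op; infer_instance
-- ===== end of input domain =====

-- B replaces A's two-pass design (index-based flag list, then a second indexed loop) with a
-- single streaming pass that keeps only the previous character (objective: simpler).

-- ===== PORT A =====
def is_operator (ch : Char) : Bool := ['^', '*', '/', '+', '-'].contains ch

-- loop-body condition of check_incre_decre_op; 's[i-1]' is ported with pyGet? (i-1),
-- which reproduces Python's negative-index wrap at i = 0 exactly
def checkCond (s : String) (i : Int) : Bool :=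
  (i == 0 && (PySem.Str.pyGet? s i == some '+' || PySem.Str.pyGet? s i == some '-'))
  || ((match PySem.Str.pyGet? s (i - 1) with | some c => is_operator c | none => false)
        && (PySem.Str.pyGet? s i == some '+' || PySem.Str.pyGet? s i == some '-'))
  || ((PySem.Str.pyGet? s (i - 1) == some '(')
        && (PySem.Str.pyGet? s i == some '+' || PySem.Str.pyGet? s i == some '-'))

def check_incre_decre_op (s : String) : List String :=
  (PySem.List.pyRange 0 (PySem.Str.len s) 1).foldl
    (fun result i => result ++ [if checkCond s i then "true" else "false"]) []

def convert_unary_to_binary_op (s : String) : String :=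
  let result := check_incre_decre_op s
  (PySem.List.pyRange 0 (PySem.Str.len s) 1).foldl
    (fun new_str i =>
      if PySem.List.pyGet? result i == some "true" then
        if PySem.Str.pyGet? s i == some '-' then new_str ++ "(0-1)*" else new_str
      else
        new_str ++ (match PySem.Str.pyGet? s i with | some c => String.singleton c | none => ""))
    ""

-- ===== PORT B =====
def unary_test (prev : Option Char) (ch : Char) : Bool :=
  (ch == '+' || ch == '-') &&
    (match prev with
     | none => true
     | some p => ['^', '*', '/', '+', '-', '('].contains p)

def altPiece (prev : Option Char) (ch : Char) : List String :=
  if unary_test prev ch then (if ch == '-' then ["(0-1)*"] else []) else [String.singleton ch]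

def altGo (prev : Option Char) : List Char → List String
  | [] => []
  | ch :: rest => altPiece prev ch ++ altGo (some ch) rest

def convert_unary_to_binary_op_alt (s : String) : String :=
  PySem.Str.join "" (altGo none s.toList)

-- ===== PRECONDITION & SPEC =====
def Spec_convert_unary_to_binary_op (s : String) (out : String) : Prop := out = convert_unary_to_binary_op_alt s
instance (s : String) (out : String) : Decidable (Spec_convert_unary_to_binary_op s out) := by unfold Spec_convert_unary_to_binary_op; infer_instance

-- ===== CLAIM (what is proved, stated in full; the proofs are below) =====
def Claim_equal_convert_unary_to_binary_op : Prop := ∀ (s : String), Dom_convert_unary_to_binary_op s → Spec_convert_unary_to_binary_op s (convert_unary_to_binary_op s)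

-- ===== LEMMAS AND PROOFS =====

-- ''.join over a list of strings: cons and append laws
theorem joinE_nil : PySem.Str.join "" [] = "" := by
  simp [PySem.Str.join, PySem.Chars.join_nil]

theorem joinE_cons (x : String) (t : List String) :
    PySem.Str.join "" (x :: t) = x ++ PySem.Str.join "" t := by
  cases t with
  | nil => simp [PySem.Str.join, PySem.Chars.join_singleton, PySem.Chars.join_nil]
  | cons y t => simp [PySem.Str.join, PySem.Chars.join_cons_cons, String.ofList_append]

theorem joinE_append (a b : List String) :
    PySem.Str.join "" (a ++ b) = PySem.Str.join "" a ++ PySem.Str.join "" b := by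
  induction a with
  | nil => simp [joinE_nil]
  | cons x t ih => simp [joinE_cons, ih, String.append_assoc]

theorem joinE_singleton (x : String) : PySem.Str.join "" [x] = x := by
  simp [PySem.Str.join, PySem.Chars.join_singleton]

-- a fold that only appends pieces is the join of the mapped pieces
theorem foldl_appendStr (l : List Int) (g : Int → String) (acc : String) :
    l.foldl (fun a i => a ++ g i) acc = acc ++ PySem.Str.join "" (l.map g) := by
  induction l generalizing acc with
  | nil => simp [joinE_nil]
  | cons i t ih => simp [List.foldl_cons, ih, joinE_cons, String.append_assoc]

-- the piece A's second loop appends at index i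
def pieceA (s : String) (result : List String) (i : Int) : String :=
  if PySem.List.pyGet? result i == some "true" then
    (if PySem.Str.pyGet? s i == some '-' then "(0-1)*" else "")
  else (match PySem.Str.pyGet? s i with | some c => String.singleton c | none => "")

theorem flags_eq (s : String) :
    check_incre_decre_op s =
      (PySem.List.pyRange 0 (PySem.Str.len s) 1).map
        (fun i => if checkCond s i then "true" else "false") := by
  unfold check_incre_decre_op
  rw [PySem.List.foldl_append_singleton_eq_map]
  simp

theorem A_as_join (s : String) :
    convert_unary_to_binary_op s =
      PySem.Str.join "" ((PySem.List.pyRange 0 (PySem.Str.len s) 1).map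
        (pieceA s (check_incre_decre_op s))) := by
  unfold convert_unary_to_binary_op
  have hstep :
      (fun (new_str : String) (i : Int) =>
        if PySem.List.pyGet? (check_incre_decre_op s) i == some "true" then
          if PySem.Str.pyGet? s i == some '-' then new_str ++ "(0-1)*" else new_str
        else
          new_str ++ (match PySem.Str.pyGet? s i with | some c => String.singleton c | none => ""))
      = fun (new_str : String) (i : Int) => new_str ++ pieceA s (check_incre_decre_op s) i := by
    funext a i
    unfold pieceA
    split_ifs <;> simp
  dsimp only
  rw [hstep, foldl_appendStr]
  simp

-- the "previous character" after consuming xs starting from prev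
def prevOf (prev : Option Char) (xs : List Char) : Option Char :=
  match xs.getLast? with
  | some d => some d
  | none => prev

theorem altGo_append (xs : List Char) (prev : Option Char) (c : Char) :
    altGo prev (xs ++ [c]) = altGo prev xs ++ altPiece (prevOf prev xs) c := by
  induction xs generalizing prev with
  | nil => simp [altGo, prevOf]
  | cons x t ih =>
    have hp : prevOf (some x) t = prevOf prev (x :: t) := by
      cases t with
      | nil => simp [prevOf]
      | cons y t' =>
        unfold prevOf
        rw [List.getLast?_cons_cons]
        cases h : (y :: t').getLast? with
        | none => exact absurd (List.getLast?_eq_none_iff.mp h) (by simp)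
        | some d => rfl
    simp [altGo, ih, hp]

-- the piece A appends at index k equals the piece B appends at position k
theorem piece_eq (s : String) (k : Nat) (hk : k < s.toList.length) :
    pieceA s (check_incre_decre_op s) (k : Int) =
      PySem.Str.join "" (altPiece (prevOf none (s.toList.take k)) s.toList[k]) := by
  have hflag : PySem.List.pyGet? (check_incre_decre_op s) (k : Int)
      = some (if checkCond s (k : Int) then "true" else "false") := by
    rw [flags_eq, PySem.List.pyGet?_natCast, PySem.Str.len_eq]
    exact PySem.List.getElem?_map_pyRange_zero _ _ _ hk
  have hsk : PySem.Str.pyGet? s (k : Int) = some s.toList[k] := by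
    rw [PySem.Str.pyGet?_natCast]
    exact List.getElem?_eq_getElem hk
  unfold pieceA
  rw [hflag, hsk]
  cases k with
  | zero =>
    -- first character: A's i==0 disjunct fires exactly on a sign; B has prev = none
    have hprev : prevOf none (s.toList.take 0) = none := by simp [prevOf]
    rw [hprev]
    unfold checkCond altPiece unary_test
    rw [hsk]
    cases hplus : (s.toList[0] == '+') <;> cases hminus : (s.toList[0] == '-') <;>
      simp [joinE_nil, joinE_cons, hplus, hminus]
  | succ j =>
    have hj : j < s.toList.length := by omega
    have hprev : prevOf none (s.toList.take (j + 1)) = some s.toList[j] := by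
      unfold prevOf
      rw [List.take_succ_eq_append_getElem hj, List.getLast?_concat]
    have hsj : PySem.Str.pyGet? s ((j + 1 : Nat) : Int) = some s.toList[j + 1] := hsk
    have hsj' : PySem.Str.pyGet? s (((j + 1 : Nat) : Int) - 1) = some s.toList[j] := by
      have : (((j + 1 : Nat) : Int) - 1) = (j : Int) := by push_cast; ring
      rw [this, PySem.Str.pyGet?_natCast]
      exact List.getElem?_eq_getElem hj
    rw [hprev]
    unfold checkCond altPiece unary_test
    rw [hsj, hsj']
    have hz : (((j + 1 : Nat) : Int) == 0) = false := by
      rw [beq_eq_false_iff_ne]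
      omega
    rw [hz]
    cases hplus : (s.toList[j + 1] == '+') <;> cases hminus : (s.toList[j + 1] == '-') <;>
      cases hop : is_operator s.toList[j] <;> cases hpar : (s.toList[j] == '(') <;>
      simp_all [is_operator, joinE_nil, joinE_cons]

-- main induction: A's join over the first k indices is B's run over the first k characters
theorem main_take (s : String) :
    ∀ k, k ≤ s.toList.length →
      PySem.Str.join "" ((PySem.List.pyRange 0 (k : Int) 1).map
        (pieceA s (check_incre_decre_op s)))
        = PySem.Str.join "" (altGo none (s.toList.take k)) := by
  intro k
  induction k with
  | zero => intro _; simp [PySem.List.pyRange_one_eq_nil, altGo, joinE_nil]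
  | succ j ih =>
    intro hk
    have hj : j < s.toList.length := by omega
    have hr : PySem.List.pyRange 0 ((j + 1 : Nat) : Int) 1
        = PySem.List.pyRange 0 (j : Int) 1 ++ [(j : Int)] := by
      have : ((j + 1 : Nat) : Int) = (j : Int) + 1 := by push_cast; ring
      rw [this, PySem.List.pyRange_one_succ_right (by positivity)]
    rw [hr, List.map_append, joinE_append, ih (by omega),
      List.take_succ_eq_append_getElem hj, altGo_append, joinE_append]
    simp only [List.map_cons, List.map_nil]
    rw [piece_eq s j hj, joinE_singleton]

-- ===== VERDICT (by name: the statement is the Claim_ definition above) =====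
theorem convert_unary_to_binary_op_spec : Claim_equal_convert_unary_to_binary_op := by
  intro s _
  unfold Spec_convert_unary_to_binary_op convert_unary_to_binary_op_alt
  rw [A_as_join, PySem.Str.len_eq, main_take s s.toList.length (le_refl _), List.take_length]
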